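-- pv_equiv track=rewrite | github.com/RinKerman/LanDisk | src/tools.py | sort_tags_by_type
-- ===== SOURCE A (Python) =====
-- def sort_tags_by_type(arr):
--     todo_arr = []
--     http_arr = []
--     rest_arr = []
--     for item in arr:
--         if is_type(item, "TODO"):
--             todo_arr.append(item)
--         elif is_type(item, "http"):
--             http_arr.append(item)
--         else:
--             rest_arr.append(item)
--     return todo_arr + rest_arr + http_arr
--
-- def is_type(strs, type_name):
--     return strs.startswith(type_name)
-- ===== SOURCE B (Python) =====
-- def sort_tags_by_type(arr):
--     def rank(item):
--         if item.startswith("TODO"):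
--             return 0
--         if item.startswith("http"):
--             return 2
--         return 1
--     return sorted(arr, key=rank)
-- ===== Notes on version B (the rewrite author's own statement) =====
-- stated objective: idiomatic
-- what changed: Replaces the three accumulator lists and final concatenation with a single stable sort by a 0/1/2 rank key (TODO < rest < http), relying on sort stability for intra-group order.
import Mathlib
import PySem

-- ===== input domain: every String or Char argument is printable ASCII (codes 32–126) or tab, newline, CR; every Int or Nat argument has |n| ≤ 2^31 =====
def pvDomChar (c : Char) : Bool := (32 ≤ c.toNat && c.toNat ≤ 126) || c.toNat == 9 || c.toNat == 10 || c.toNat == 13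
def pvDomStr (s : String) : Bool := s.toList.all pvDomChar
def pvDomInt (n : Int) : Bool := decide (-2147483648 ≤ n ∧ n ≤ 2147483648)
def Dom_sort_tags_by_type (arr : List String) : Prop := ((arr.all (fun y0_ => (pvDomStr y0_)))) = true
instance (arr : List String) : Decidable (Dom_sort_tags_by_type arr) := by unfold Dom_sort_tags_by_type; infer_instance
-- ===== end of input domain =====

-- B replaces A's three accumulator lists with one stable sort by a 0/1/2 rank key (idiomatic; not faster).

-- ===== PORT A =====
def is_type (strs : String) (type_name : String) : Bool :=
  PySem.Str.startswith strs type_name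

def sort_tags_by_type (arr : List String) : List String :=
  let s := arr.foldl (fun (acc : List String × List String × List String) item =>
    if is_type item "TODO" then (acc.1 ++ [item], acc.2.1, acc.2.2)
    else if is_type item "http" then (acc.1, acc.2.1 ++ [item], acc.2.2)
    else (acc.1, acc.2.1, acc.2.2 ++ [item])) ([], [], [])
  s.1 ++ s.2.2 ++ s.2.1

-- ===== PORT B =====
def pvRank (item : String) : Int :=
  if PySem.Str.startswith item "TODO" then 0
  else if PySem.Str.startswith item "http" then 2
  else 1

def sort_tags_by_type_alt (arr : List String) : List String :=
  PySem.List.sorted arr pvRank false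

-- ===== PRECONDITION & SPEC =====
def Spec_sort_tags_by_type (arr : List String) (out : List String) : Prop := out = sort_tags_by_type_alt arr
instance (arr : List String) (out : List String) : Decidable (Spec_sort_tags_by_type arr out) := by unfold Spec_sort_tags_by_type; infer_instance

-- ===== CLAIM (what is proved, stated in full; the proofs are below) =====
def Claim_equal_sort_tags_by_type : Prop := ∀ (arr : List String), Dom_sort_tags_by_type arr → Spec_sort_tags_by_type arr (sort_tags_by_type arr)

-- ===== LEMMAS AND PROOFS =====

def pvBef (a b : String) : Bool := decide (pvRank a < pvRank b)

lemma pvBef_false_of_le {x y : String} (h : pvRank y ≤ pvRank x) : pvBef x y = false := by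
  simp [pvBef]; omega

lemma insertBy_append_skip (x : String) (A B : List String)
    (h : ∀ y ∈ A, pvBef x y = false) :
    PySem.List.insertBy pvBef x (A ++ B) = A ++ PySem.List.insertBy pvBef x B := by
  induction A with
  | nil => rfl
  | cons a A ih =>
    have ha : pvBef x a = false := h a (by simp)
    simp [PySem.List.insertBy, ha, ih (fun y hy => h y (by simp [hy]))]

lemma insertBy_eq_cons (x : String) (B : List String)
    (h : ∀ y, B.head? = some y → pvBef x y = true) :
    PySem.List.insertBy pvBef x B = x :: B := by
  cases B with
  | nil => rfl
  | cons b B => simp [PySem.List.insertBy, h b rfl]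

lemma pvRank_cases (x : String) : pvRank x = 0 ∨ pvRank x = 1 ∨ pvRank x = 2 := by
  unfold pvRank; split_ifs <;> simp

lemma pvRank_le_two (x : String) : pvRank x ≤ 2 := by
  unfold pvRank; split_ifs <;> simp

lemma foldl_insertBy_partition (xs : List String) (A0 A1 A2 : List String)
    (h0 : ∀ y ∈ A0, pvRank y = 0) (h1 : ∀ y ∈ A1, pvRank y = 1) (h2 : ∀ y ∈ A2, pvRank y = 2) :
    xs.foldl (fun acc x => PySem.List.insertBy pvBef x acc) (A0 ++ A1 ++ A2)
    = (A0 ++ xs.filter (fun s => pvRank s == 0))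
      ++ (A1 ++ xs.filter (fun s => pvRank s == 1))
      ++ (A2 ++ xs.filter (fun s => pvRank s == 2)) := by
  induction xs generalizing A0 A1 A2 with
  | nil => simp
  | cons x xs ih =>
    simp only [List.foldl_cons]
    rcases pvRank_cases x with hx | hx | hx
    · have step : PySem.List.insertBy pvBef x (A0 ++ A1 ++ A2)
          = (A0 ++ [x]) ++ A1 ++ A2 := by
        rw [List.append_assoc,
          insertBy_append_skip x A0 (A1 ++ A2)
            (fun y hy => pvBef_false_of_le (by rw [hx, h0 y hy])),
          insertBy_eq_cons x (A1 ++ A2) (fun y hy => by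
            have : y ∈ A1 ++ A2 := List.mem_of_mem_head? hy
            rcases List.mem_append.mp this with h | h
            · simp [pvBef, hx, h1 y h]
            · simp [pvBef, hx, h2 y h])]
        simp
      rw [step, ih (A0 ++ [x]) A1 A2
          (fun y hy => by rcases List.mem_append.mp hy with h | h
                          · exact h0 y h
                          · simpa [List.mem_singleton.mp h] using hx)
          h1 h2]
      simp [hx]
    · have step : PySem.List.insertBy pvBef x (A0 ++ A1 ++ A2)
          = A0 ++ (A1 ++ [x]) ++ A2 := by
        rw [insertBy_append_skip x (A0 ++ A1) A2
            (fun y hy => by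
              rcases List.mem_append.mp hy with h | h
              · exact pvBef_false_of_le (by rw [hx, h0 y h]; norm_num)
              · exact pvBef_false_of_le (by rw [hx, h1 y h])),
          insertBy_eq_cons x A2 (fun y hy => by
            have : y ∈ A2 := List.mem_of_mem_head? hy
            simp [pvBef, hx, h2 y this])]
        simp
      rw [step, ih A0 (A1 ++ [x]) A2 h0
          (fun y hy => by rcases List.mem_append.mp hy with h | h
                          · exact h1 y h
                          · simpa [List.mem_singleton.mp h] using hx)
          h2]
      simp [hx]
    · have step : PySem.List.insertBy pvBef x (A0 ++ A1 ++ A2)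
          = A0 ++ A1 ++ (A2 ++ [x]) := by
        rw [PySem.List.insertBy_of_forall_not_before pvBef x (A0 ++ A1 ++ A2)
            (fun y _ => pvBef_false_of_le (by rw [hx]; exact pvRank_le_two y))]
        simp
      rw [step, ih A0 A1 (A2 ++ [x]) h0 h1
          (fun y hy => by rcases List.mem_append.mp hy with h | h
                          · exact h2 y h
                          · simpa [List.mem_singleton.mp h] using hx)]
      simp [hx]

lemma foldA_components (xs : List String) (t h r : List String) :
    xs.foldl (fun (acc : List String × List String × List String) item =>
      if is_type item "TODO" then (acc.1 ++ [item], acc.2.1, acc.2.2)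
      else if is_type item "http" then (acc.1, acc.2.1 ++ [item], acc.2.2)
      else (acc.1, acc.2.1, acc.2.2 ++ [item])) (t, h, r)
    = (t ++ xs.filter (fun s => pvRank s == 0),
       h ++ xs.filter (fun s => pvRank s == 2),
       r ++ xs.filter (fun s => pvRank s == 1)) := by
  induction xs generalizing t h r with
  | nil => simp
  | cons x xs ih =>
    simp only [List.foldl_cons]
    by_cases ht : is_type x "TODO" = true
    · have hr : pvRank x = 0 := by
        unfold pvRank; rw [if_pos (show PySem.Str.startswith x "TODO" = true from ht)]
      rw [if_pos ht, ih]
      simp [hr]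
    · by_cases hh : is_type x "http" = true
      · have hr : pvRank x = 2 := by
          unfold pvRank
          rw [if_neg (show ¬PySem.Str.startswith x "TODO" = true from ht),
            if_pos (show PySem.Str.startswith x "http" = true from hh)]
        rw [if_neg ht, if_pos hh, ih]
        simp [hr]
      · have hr : pvRank x = 1 := by
          unfold pvRank
          rw [if_neg (show ¬PySem.Str.startswith x "TODO" = true from ht),
            if_neg (show ¬PySem.Str.startswith x "http" = true from hh)]
        rw [if_neg ht, if_neg hh, ih]
        simp [hr]

-- ===== VERDICT (by name: the statement is the Claim_ definition above) =====
theorem sort_tags_by_type_spec : Claim_equal_sort_tags_by_type := by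
  intro arr _
  unfold Spec_sort_tags_by_type sort_tags_by_type sort_tags_by_type_alt
  have hB : PySem.List.sorted arr pvRank false
      = arr.filter (fun s => pvRank s == 0) ++ arr.filter (fun s => pvRank s == 1)
        ++ arr.filter (fun s => pvRank s == 2) := by
    rw [PySem.List.sorted_eq_foldl_insertBy]
    simpa using foldl_insertBy_partition arr [] [] [] (by simp) (by simp) (by simp)
  rw [hB, foldA_components]
  simp
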